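-- pv_equiv track=rewrite | github.com/Menschenkindlein/py-dj-battleship | battleship/battleship.py | _my_net
-- ===== SOURCE A (Python) =====
-- def _my_net(n,startx):
--     starty = 1
--     a = []
--     for pos in range(0,10):
--         the_min = min(10-startx,10-starty)
--         for inc in range(0,the_min+1):
--             a.append((startx+inc,starty+inc))
--         startx = startx - starty + 1 - n
--         if startx < 1:
--             starty = 2 - startx
--             startx = 1
--     return a
-- ===== SOURCE B (Python) =====
-- def _my_net(n, startx):
--     # Recursive decomposition: each diagonal is generated by iterating x
--     # directly (y derived as x - sx + sy), no the_min / inc variables.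
--     def diag(sx, sy):
--         return [(x, x - sx + sy) for x in range(sx, min(10, 10 + sx - sy) + 1)]
--
--     def go(k, sx, sy):
--         if k == 0:
--             return []
--         t = sx - sy + 1 - n
--         rest = go(k - 1, 1, 2 - t) if t < 1 else go(k - 1, t, sy)
--         return diag(sx, sy) + rest
--
--     return go(10, startx, 1)
-- ===== Notes on version B (the rewrite author's own statement) =====
-- stated objective: alternative
-- what changed: Replaces the accumulator loop by structural recursion that concatenates each diagonal onto the recursive tail, and generates each diagonal by iterating the x coordinate directly over range(sx, min(10, 10+sx-sy)+1) with y derived arithmetically, eliminating A's the_min/inc offset variables.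
import Mathlib
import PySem

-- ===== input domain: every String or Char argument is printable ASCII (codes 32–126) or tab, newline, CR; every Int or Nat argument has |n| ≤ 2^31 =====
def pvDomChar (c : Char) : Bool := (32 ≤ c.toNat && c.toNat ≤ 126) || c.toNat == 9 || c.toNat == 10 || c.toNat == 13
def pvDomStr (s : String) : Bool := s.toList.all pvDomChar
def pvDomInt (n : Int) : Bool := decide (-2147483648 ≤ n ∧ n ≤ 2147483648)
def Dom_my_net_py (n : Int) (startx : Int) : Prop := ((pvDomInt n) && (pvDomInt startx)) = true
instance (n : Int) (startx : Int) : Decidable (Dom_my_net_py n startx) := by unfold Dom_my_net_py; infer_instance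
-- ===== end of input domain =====

-- B rewrites A's accumulator loop as structural recursion concatenating each diagonal onto the
-- recursive tail, and generates each diagonal by iterating x directly (y derived arithmetically).

-- ===== PORT A =====
-- one iteration of A's outer loop: emit this diagonal's coordinates, then advance (startx, starty)
def pvStepA (n : Int) (s : Int × Int × List (Int × Int)) (_ : Int) : Int × Int × List (Int × Int) :=
  let sx := s.1; let sy := s.2.1
  let the_min := min (10 - sx) (10 - sy)
  let a := (PySem.List.pyRange 0 (the_min + 1) 1).foldl
    (fun acc inc => acc ++ [(sx + inc, sy + inc)]) s.2.2
  let sx' := sx - sy + 1 - n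
  if sx' < 1 then (1, 2 - sx', a) else (sx', sy, a)

def my_net_py (n : Int) (startx : Int) : List (Int × Int) :=
  ((PySem.List.pyRange 0 10 1).foldl (pvStepA n) (startx, 1, [])).2.2

-- ===== PORT B =====
-- diag in Source B: iterate the x coordinate, derive y
def pvDiag (sx sy : Int) : List (Int × Int) :=
  (PySem.List.pyRange sx (min 10 (10 + sx - sy) + 1) 1).map (fun x => (x, x - sx + sy))

-- go in Source B: structural recursion, diagonal ++ recursive tail
def pvGo (n : Int) : Nat → Int → Int → List (Int × Int)
  | 0, _, _ => []
  | k + 1, sx, sy =>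
    let t := sx - sy + 1 - n
    let rest := if t < 1 then pvGo n k 1 (2 - t) else pvGo n k t sy
    pvDiag sx sy ++ rest

def my_net_py_alt (n : Int) (startx : Int) : List (Int × Int) := pvGo n 10 startx 1

-- ===== PRECONDITION & SPEC =====
def Spec_my_net_py (n : Int) (startx : Int) (out : List (Int × Int)) : Prop := out = my_net_py_alt n startx
instance (n : Int) (startx : Int) (out : List (Int × Int)) : Decidable (Spec_my_net_py n startx out) := by unfold Spec_my_net_py; infer_instance

-- ===== CLAIM (what is proved, stated in full; the proofs are below) =====
def Claim_equal_my_net_py : Prop := ∀ (n : Int) (startx : Int), Dom_my_net_py n startx → Spec_my_net_py n startx (my_net_py n startx)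

-- ===== LEMMAS AND PROOFS =====

-- A's inner append loop just concatenates the mapped range onto the accumulator
lemma pv_foldl_app (l : List Int) (f : Int → Int × Int) (a : List (Int × Int)) :
    l.foldl (fun acc inc => acc ++ [f inc]) a = a ++ l.map f := by
  induction l generalizing a with
  | nil => simp
  | cons x xs ih => simp [List.foldl, ih]

-- A's offset-generated diagonal is B's x-iterated diagonal
lemma pv_diag_eq (sx sy : Int) :
    (PySem.List.pyRange 0 (min (10 - sx) (10 - sy) + 1) 1).map
      (fun inc => (sx + inc, sy + inc)) = pvDiag sx sy := by
  unfold pvDiag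
  rw [PySem.List.pyRange_one, PySem.List.pyRange_one, List.map_map, List.map_map]
  have h : (min 10 (10 + sx - sy) + 1 - sx).toNat = (min (10 - sx) (10 - sy) + 1 - 0).toNat := by
    omega
  rw [h]
  refine List.map_congr_left fun k _ => ?_
  simp only [Function.comp]
  refine Prod.ext ?_ ?_ <;> simp <;> ring

-- main loop correspondence: A's fold equals B's recursion (driven by the range's length)
lemma pv_main (n : Int) (l : List Int) (sx sy : Int) (a : List (Int × Int)) :
    (l.foldl (pvStepA n) (sx, sy, a)).2.2 = a ++ pvGo n l.length sx sy := by
  induction l generalizing sx sy a with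
  | nil => simp [pvGo]
  | cons x xs ih =>
    simp only [List.foldl, List.length_cons, pvGo, pvStepA, pv_foldl_app, pv_diag_eq]
    split_ifs with h <;> · rw [ih]; simp

-- ===== VERDICT (by name: the statement is the Claim_ definition above) =====
theorem my_net_py_spec : Claim_equal_my_net_py := by
  intro n startx _
  show my_net_py n startx = my_net_py_alt n startx
  unfold my_net_py my_net_py_alt
  rw [pv_main]
  norm_num [PySem.List.length_pyRange_one]
  rfl
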